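-- pv_equiv track=rewrite | github.com/analytics360-projects/Vulcan | modules/deduplication/service.py | spanish_soundex
-- ===== SOURCE A (Python) =====
-- _SOUNDEX_MAP = {
--     "b": "1", "v": "1", "f": "1",
--     "c": "2", "s": "2", "z": "2", "g": "2", "j": "2", "x": "2",
--     "d": "3", "t": "3",
--     "l": "4",
--     "m": "5", "n": "5", "ñ": "5",
--     "r": "6",
-- }
--
-- def spanish_soundex(name: str, length: int = 6) -> str:
--     if not name:
--         return ""
--     name = name.lower().strip()
--     name = name.replace("ch", "s").replace("ll", "l").replace("rr", "r").replace("qu", "k").replace("gu", "g")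
--     code = [name[0].upper()]
--     prev = _SOUNDEX_MAP.get(name[0], "0")
--     for ch in name[1:]:
--         digit = _SOUNDEX_MAP.get(ch, "0")
--         if digit != "0" and digit != prev:
--             code.append(digit)
--         prev = digit if digit != "0" else prev
--     return "".join(code)[:length].ljust(length, "0")
-- ===== SOURCE B (Python) =====
-- _SOUNDEX_MAP = {
--     "b": "1", "v": "1", "f": "1",
--     "c": "2", "s": "2", "z": "2", "g": "2", "j": "2", "x": "2",
--     "d": "3", "t": "3",
--     "l": "4",
--     "m": "5", "n": "5", "ñ": "5",
--     "r": "6",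
-- }
--
-- def _dedup_adjacent(xs):
--     # collapse runs of equal consecutive elements (like itertools.groupby keys)
--     if not xs:
--         return []
--     return [xs[0]] + [b for a, b in zip(xs, xs[1:]) if b != a]
--
-- def spanish_soundex(name: str, length: int = 6) -> str:
--     if not name:
--         return ""
--     name = name.lower().strip()
--     name = name.replace("ch", "s").replace("ll", "l").replace("rr", "r").replace("qu", "k").replace("gu", "g")
--     # digit sequence: seed with the first char's code, then all non-zero codes of the rest
--     seq = [_SOUNDEX_MAP.get(name[0], "0")]
--     seq += [d for ch in name[1:] for d in [_SOUNDEX_MAP.get(ch, "0")] if d != "0"]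
--     # collapse consecutive duplicates, then drop the seed
--     collapsed = _dedup_adjacent(seq)
--     result = name[0].upper() + "".join(collapsed[1:])
--     return result[:length].ljust(length, "0")
-- ===== Notes on version B (the rewrite author's own statement) =====
-- stated objective: alternative
-- what changed: Replaces A's single pass with mutable prev/code state by a two-stage pipeline: build the non-zero code sequence seeded with the first char's code, collapse adjacent duplicates with a zip-based dedup helper, then drop the seed.
import Mathlib
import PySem

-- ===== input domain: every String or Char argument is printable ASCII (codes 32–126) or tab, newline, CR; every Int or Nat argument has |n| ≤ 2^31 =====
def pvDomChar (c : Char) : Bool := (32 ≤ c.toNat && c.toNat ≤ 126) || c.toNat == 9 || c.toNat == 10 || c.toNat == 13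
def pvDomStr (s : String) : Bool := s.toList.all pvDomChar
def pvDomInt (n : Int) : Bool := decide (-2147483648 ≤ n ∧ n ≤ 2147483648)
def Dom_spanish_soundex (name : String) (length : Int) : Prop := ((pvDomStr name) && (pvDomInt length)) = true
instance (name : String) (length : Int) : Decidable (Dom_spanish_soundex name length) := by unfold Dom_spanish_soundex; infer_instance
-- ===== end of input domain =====

-- B replaces A's prev-tracking single pass by a two-stage pipeline (filter the non-zero
-- codes, then collapse adjacent duplicates of the seeded sequence); objective: alternative.

-- ===== PORT A =====
-- the module-level dict _SOUNDEX_MAP (keys/values are single characters, modelled as Char)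
def pvSoundexMap : PySem.Dict Char Char := PySem.Dict.ofList
  [('b','1'), ('v','1'), ('f','1'),
   ('c','2'), ('s','2'), ('z','2'), ('g','2'), ('j','2'), ('x','2'),
   ('d','3'), ('t','3'),
   ('l','4'),
   ('m','5'), ('n','5'), ('ñ','5'),
   ('r','6')]

-- shared preprocessing (identical lines of both Pythons): lower, strip, the five replaces
def pvPrep (name : String) : List Char :=
  let nm := PySem.Chars.strip (PySem.Chars.lower name.toList)
  PySem.Chars.replace (PySem.Chars.replace (PySem.Chars.replace (PySem.Chars.replace
    (PySem.Chars.replace nm "ch".toList "s".toList) "ll".toList "l".toList)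
    "rr".toList "r".toList) "qu".toList "k".toList) "gu".toList "g".toList

-- s.ljust(length, "0") on code points (exact: no padding when length ≤ len(s))
def pvLjustZero (cs : List Char) (length : Int) : List Char :=
  cs ++ List.replicate (length - cs.length).toNat '0'

def spanish_soundex (name : String) (length : Int) : String :=
  if name = "" then "" else
  let nm := pvPrep name
  match nm with
  | [] => ""   -- Python raises IndexError here (name[0]); excluded by Pre_
  | c :: rest =>
    let code : List Char := [PySem.Chars.upperChar c]
    let prev : Char := pvSoundexMap.getD c '0'
    let st := rest.foldl (fun (st : List Char × Char) ch =>
      let digit := pvSoundexMap.getD ch '0'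
      let code := if digit ≠ '0' ∧ digit ≠ st.2 then st.1 ++ [digit] else st.1
      let prev := if digit ≠ '0' then digit else st.2
      (code, prev)) (code, prev)
    String.ofList (pvLjustZero (PySem.List.slice st.1 none (some length)) length)

-- ===== PORT B =====
-- _dedup_adjacent(xs): [xs[0]] + [b for a, b in zip(xs, xs[1:]) if b != a]
def pvDedupAdjacent (xs : List Char) : List Char :=
  match xs with
  | [] => []
  | x :: _ => x :: ((xs.zip xs.tail).filter (fun p => p.2 ≠ p.1)).map Prod.snd

def spanish_soundex_alt (name : String) (length : Int) : String :=
  if name = "" then "" else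
  let nm := pvPrep name
  match nm with
  | [] => ""   -- Python raises IndexError here (name[0]); excluded by Pre_
  | c :: rest =>
    let seq : List Char := pvSoundexMap.getD c '0' ::
      (rest.map (fun ch => pvSoundexMap.getD ch '0')).filter (fun d => d ≠ '0')
    let collapsed := pvDedupAdjacent seq
    let result := PySem.Chars.upperChar c :: collapsed.tail
    String.ofList (pvLjustZero (PySem.List.slice result none (some length)) length)

-- ===== PRECONDITION & SPEC =====
-- Pre_ excludes nonempty all-whitespace names, on which A raises IndexError at name[0]
-- after stripping (B raises there too).
def Pre_spanish_soundex (name : String) (length : Int) : Prop :=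
  name = "" ∨ PySem.Str.strip name ≠ ""
instance (name : String) (length : Int) : Decidable (Pre_spanish_soundex name length) := by
  unfold Pre_spanish_soundex; infer_instance

def pvWitness_spanish_soundex : String × Int := ("Gonzalez", 6)

def Spec_spanish_soundex (name : String) (length : Int) (out : String) : Prop := out = spanish_soundex_alt name length
instance (name : String) (length : Int) (out : String) : Decidable (Spec_spanish_soundex name length out) := by unfold Spec_spanish_soundex; infer_instance

-- ===== CLAIM (what is proved, stated in full; the proofs are below) =====
def Claim_equal_spanish_soundex : Prop := ∀ (name : String) (length : Int), Dom_spanish_soundex name length → Pre_spanish_soundex name length → Spec_spanish_soundex name length (spanish_soundex name length)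

-- ===== LEMMAS AND PROOFS =====

-- the digits A's loop appends, as a recursive function of the remaining chars and prev
def pvAppended (rest : List Char) (prev : Char) : List Char :=
  match rest with
  | [] => []
  | ch :: rest =>
    let d := pvSoundexMap.getD ch '0'
    if d ≠ '0' ∧ d ≠ prev then d :: pvAppended rest d
    else pvAppended rest (if d ≠ '0' then d else prev)

-- the tail of pvDedupAdjacent (prev :: xs), recursively
def pvDT (prev : Char) (xs : List Char) : List Char :=
  match xs with
  | [] => []
  | x :: xs => (if x ≠ prev then [x] else []) ++ pvDT x xs

theorem pvFoldA_eq (rest : List Char) (acc : List Char) (prev : Char) :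
    (rest.foldl (fun (st : List Char × Char) ch =>
      let digit := pvSoundexMap.getD ch '0'
      let code := if digit ≠ '0' ∧ digit ≠ st.2 then st.1 ++ [digit] else st.1
      let prev := if digit ≠ '0' then digit else st.2
      (code, prev)) (acc, prev)).1 = acc ++ pvAppended rest prev := by
  induction rest generalizing acc prev with
  | nil => simp [pvAppended]
  | cons ch rest ih =>
    simp only [List.foldl_cons, pvAppended]
    split_ifs with h <;> simp_all

theorem pvAppended_eq_pvDT (rest : List Char) (prev : Char) :
    pvAppended rest prev =
      pvDT prev ((rest.map (fun ch => pvSoundexMap.getD ch '0')).filter (fun d => d ≠ '0')) := by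
  induction rest generalizing prev with
  | nil => simp [pvAppended, pvDT]
  | cons ch rest ih =>
    simp only [pvAppended, List.map_cons]
    by_cases h0 : pvSoundexMap.getD ch '0' = '0'
    · simp [h0, ih]
    · by_cases hp : pvSoundexMap.getD ch '0' = prev
      · have h0' : prev ≠ '0' := hp ▸ h0
        simp [hp, h0', pvDT, ih]
      · simp [h0, hp, pvDT, ih]

theorem pvDedupAdjacent_cons_tail (prev : Char) (xs : List Char) :
    (pvDedupAdjacent (prev :: xs)).tail = pvDT prev xs := by
  suffices h : ∀ (p : Char) (ys : List Char),
      (((p :: ys).zip ys).filter (fun q => q.2 ≠ q.1)).map Prod.snd = pvDT p ys by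
    simpa [pvDedupAdjacent] using h prev xs
  intro p ys
  induction ys generalizing p with
  | nil => simp [pvDT]
  | cons y ys ih =>
    simp only [List.zip_cons_cons, List.filter_cons, pvDT]
    split_ifs with h <;> simp_all

-- ===== VERDICT (by name: the statement is the Claim_ definition above) =====
theorem spanish_soundex_spec : Claim_equal_spanish_soundex := by
  intro name length _ _
  unfold Spec_spanish_soundex spanish_soundex spanish_soundex_alt
  by_cases h : name = ""
  · rw [if_pos h, if_pos h]
  · rw [if_neg h, if_neg h]
    generalize pvPrep name = nm
    cases nm with
    | nil => rfl
    | cons c rest =>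
      simp only [pvFoldA_eq, pvAppended_eq_pvDT, ← pvDedupAdjacent_cons_tail,
        List.singleton_append]
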